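-- pv_equiv track=rewrite | github.com/WilsonGregory/TensorPolynomials | src/tensorpolynomials/utils.py | metric_tensor_basis_size
-- ===== SOURCE A (Python) =====
-- import math
--
-- def B(k: int) -> int:
--     assert k % 2 == 0
--     return math.factorial(k) // (math.factorial(k // 2) * (2 ** (k // 2)))
--
-- def metric_tensor_basis_size(total_k: int, n: int) -> int:
--     total = 0
--     for k in range(2, total_k + 1):
--         for j in range(k // 2):
--             n_metric_tensor = j + 1
--             total += (
--                 B(2 * n_metric_tensor)
--                 * (n ** (k - 2 * n_metric_tensor))
--                 * math.comb(k, 2 * n_metric_tensor)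
--             )
--
--     return total
-- ===== SOURCE B (Python) =====
-- def metric_tensor_basis_size(total_k: int, n: int) -> int:
--     # S(k) = sum over metric-tensor counts equals M_k - n**k, where M_k is the
--     # k-th raw moment of a normal with mean n and variance 1:
--     # M_0 = 1, M_1 = n, M_k = n*M_{k-1} + (k-1)*M_{k-2}.  One linear pass.
--     total = 0
--     m_prev, m_curr = 1, n
--     for k in range(2, total_k + 1):
--         m_prev, m_curr = m_curr, n * m_curr + (k - 1) * m_prev
--         total += m_curr - n ** k
--     return total
-- ===== Notes on version B (the rewrite author's own statement) =====
-- stated objective: faster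
-- what changed: Replaces the factorial-based double loop by a single linear recurrence pass: the inner sum equals M_k - n**k where M_k is the k-th raw moment of a normal with mean n and variance 1, computed by the rolling recurrence M_k = n*M_{k-1} + (k-1)*M_{k-2}.
import Mathlib
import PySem

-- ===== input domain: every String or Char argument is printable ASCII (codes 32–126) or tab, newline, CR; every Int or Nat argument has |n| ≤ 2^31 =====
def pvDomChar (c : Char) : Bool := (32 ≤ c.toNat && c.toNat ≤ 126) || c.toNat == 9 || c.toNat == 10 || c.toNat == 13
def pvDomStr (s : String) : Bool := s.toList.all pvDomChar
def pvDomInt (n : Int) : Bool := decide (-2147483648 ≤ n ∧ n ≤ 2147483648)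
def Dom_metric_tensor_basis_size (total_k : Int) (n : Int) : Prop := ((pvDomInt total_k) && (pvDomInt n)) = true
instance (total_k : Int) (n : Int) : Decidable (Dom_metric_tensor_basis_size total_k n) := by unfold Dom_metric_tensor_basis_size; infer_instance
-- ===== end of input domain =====

-- B replaces A's factorial-based double loop by a single linear pass maintaining the
-- normal-moment recurrence M_k = n*M_{k-1} + (k-1)*M_{k-2}, adding M_k - n^k per step.


-- ===== PORT A =====
-- math.factorial; exact for nonnegative arguments (every call site below passes k ≥ 0)
def pvFact (k : Int) : Int := (k.toNat.factorial : Int)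
-- math.comb; exact for nonnegative arguments (every call site below passes k, r ≥ 0)
def pvComb (k r : Int) : Int := (k.toNat.choose r.toNat : Int)
-- Python helper B(k); its `assert k % 2 == 0` always holds at the call sites (argument is 2*(j+1))
def pvB (k : Int) : Int :=
  PySem.Int.floordiv (pvFact k)
    (pvFact (PySem.Int.floordiv k 2) * 2 ^ (PySem.Int.floordiv k 2).toNat)

def metric_tensor_basis_size (total_k : Int) (n : Int) : Int :=
  (PySem.List.pyRange 2 (total_k + 1) 1).foldl (fun total k =>
    (PySem.List.pyRange 0 (PySem.Int.floordiv k 2) 1).foldl (fun total j =>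
      total + pvB (2 * (j + 1)) * n ^ (k - 2 * (j + 1)).toNat * pvComb k (2 * (j + 1))) total) 0

-- ===== PORT B =====
-- state is (m_prev, m_curr, total); exponents k in n ** k satisfy k ≥ 2, so n ^ k.toNat is exact
def metric_tensor_basis_size_alt (total_k : Int) (n : Int) : Int :=
  ((PySem.List.pyRange 2 (total_k + 1) 1).foldl
    (fun (st : Int × Int × Int) k =>
      (st.2.1, n * st.2.1 + (k - 1) * st.1, st.2.2 + ((n * st.2.1 + (k - 1) * st.1) - n ^ k.toNat)))
    ((1 : Int), n, (0 : Int))).2.2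

-- ===== PRECONDITION & SPEC =====
def Spec_metric_tensor_basis_size (total_k : Int) (n : Int) (out : Int) : Prop := out = metric_tensor_basis_size_alt total_k n
instance (total_k : Int) (n : Int) (out : Int) : Decidable (Spec_metric_tensor_basis_size total_k n out) := by unfold Spec_metric_tensor_basis_size; infer_instance

-- ===== CLAIM (what is proved, stated in full; the proofs are below) =====
def Claim_equal_metric_tensor_basis_size : Prop := ∀ (total_k : Int) (n : Int), Dom_metric_tensor_basis_size total_k n → Spec_metric_tensor_basis_size total_k n (metric_tensor_basis_size total_k n)

-- ===== LEMMAS AND PROOFS =====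

-- double factorial (2m-1)!! ; equals (2m)! / (m! * 2^m), A's helper B(2m)
def dd : Nat → Nat
  | 0 => 1
  | m + 1 => (2 * m + 1) * dd m

-- raw moments of a normal with mean n and variance 1 (B's recurrence)
def Mm (n : Int) : Nat → Int
  | 0 => 1
  | 1 => n
  | (k + 2) => n * Mm n (k + 1) + ((k : Int) + 1) * Mm n k

-- A's inner sum extended with its vanishing terms (choose k (2m) = 0 past k/2)
-- and with the m = 0 term (= n^k) included
def Tm (n : Int) (k : Nat) : Int :=
  ∑ m ∈ Finset.range (k + 1), ((k.choose (2 * m) : Int)) * (dd m : Int) * n ^ (k - 2 * m)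

theorem fact_two_mul (m : Nat) : (2 * m).factorial = dd m * (m.factorial * 2 ^ m) := by
  induction m with
  | zero => rfl
  | succ m ih =>
    have h : 2 * (m + 1) = (2 * m + 1) + 1 := by omega
    rw [h, Nat.factorial_succ, Nat.factorial_succ, ih, dd, Nat.factorial_succ, pow_succ]
    ring

theorem pvB_eq (m : Nat) : pvB (2 * (m : Int)) = (dd m : Int) := by
  have h2 : (2 * (m : Int)) = ((2 * m : Nat) : Int) := by push_cast; ring
  have hfd : PySem.Int.floordiv ((2 * m : Nat) : Int) 2 = ((m : Nat) : Int) := by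
    simp
  rw [pvB, h2, hfd]
  simp only [pvFact, Int.toNat_natCast]
  have hp : ((m.factorial : Int)) * 2 ^ m = ((m.factorial * 2 ^ m : Nat) : Int) := by
    push_cast; ring
  rw [hp, show ((2 * m).factorial) = dd m * (m.factorial * 2 ^ m) from fact_two_mul m,
    PySem.Int.floordiv_natCast]
  have hpos : 0 < m.factorial * 2 ^ m := by positivity
  rw [Nat.mul_div_cancel _ hpos]

-- the moment recurrence, proved for the combinatorial sum via Pascal's rule
-- and (k+1) * C(k, 2m) = C(k+1, 2m+1) * (2m+1)
theorem Tm_rec (n : Int) (k : Nat) :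
    Tm n (k + 2) = n * Tm n (k + 1) + ((k : Int) + 1) * Tm n k := by
  have hsplit : Tm n (k + 2) = (∑ m ∈ Finset.range (k + 2),
      (((k + 2).choose (2 * (m + 1)) : Int)) * (dd (m + 1) : Int) * n ^ (k + 2 - 2 * (m + 1)))
      + n ^ (k + 2) := by
    rw [Tm, Finset.sum_range_succ']
    simp [dd]
  have hterm : ∀ m ∈ Finset.range (k + 2),
      (((k + 2).choose (2 * (m + 1)) : Int)) * (dd (m + 1) : Int) * n ^ (k + 2 - 2 * (m + 1))
        = ((k : Int) + 1) * (((k.choose (2 * m) : Int)) * (dd m : Int) * n ^ (k - 2 * m))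
          + (((k + 1).choose (2 * (m + 1)) : Int)) * (dd (m + 1) : Int) * n ^ (k + 2 - 2 * (m + 1)) := by
    intro m _
    have hch : (k + 2).choose (2 * (m + 1)) = (k + 1).choose (2 * m + 1) + (k + 1).choose (2 * (m + 1)) := by
      have h := Nat.choose_succ_succ (k + 1) (2 * m + 1)
      simpa [show 2 * (m + 1) = (2 * m + 1) + 1 by ring] using h
    have hmul : ((k : Int) + 1) * (k.choose (2 * m) : Int)
        = ((k + 1).choose (2 * m + 1) : Int) * (2 * (m : Int) + 1) := by
      exact_mod_cast Nat.add_one_mul_choose_eq k (2 * m)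
    have hexp : k + 2 - 2 * (m + 1) = k - 2 * m := by omega
    rw [hch, hexp, show dd (m + 1) = (2 * m + 1) * dd m from rfl]
    push_cast
    linear_combination (- n ^ (k - 2 * m)) * (dd m : Int) * hmul
  rw [hsplit, Finset.sum_congr rfl hterm, Finset.sum_add_distrib, ← Finset.mul_sum]
  have h1 : (∑ m ∈ Finset.range (k + 2),
      ((k.choose (2 * m) : Int)) * (dd m : Int) * n ^ (k - 2 * m)) = Tm n k := by
    rw [Finset.sum_range_succ, Tm]
    have h : k.choose (2 * (k + 1)) = 0 := Nat.choose_eq_zero_of_lt (by omega)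
    simp [h]
  have h2 : (∑ m ∈ Finset.range (k + 2),
      (((k + 1).choose (2 * (m + 1)) : Int)) * (dd (m + 1) : Int) * n ^ (k + 2 - 2 * (m + 1)))
      = n * Tm n (k + 1) - n ^ (k + 2) := by
    have hT : Tm n (k + 1) = (∑ m ∈ Finset.range (k + 1),
        (((k + 1).choose (2 * (m + 1)) : Int)) * (dd (m + 1) : Int) * n ^ (k + 1 - 2 * (m + 1)))
        + n ^ (k + 1) := by
      rw [Tm, Finset.sum_range_succ']
      simp [dd]
    have hlast : ((k + 1).choose (2 * (k + 1 + 1)) : Int) = 0 := by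
      norm_cast
      exact Nat.choose_eq_zero_of_lt (by omega)
    rw [Finset.sum_range_succ, hlast, hT]
    have hcong : ∀ m ∈ Finset.range (k + 1),
        (((k + 1).choose (2 * (m + 1)) : Int)) * (dd (m + 1) : Int) * n ^ (k + 2 - 2 * (m + 1))
          = n * ((((k + 1).choose (2 * (m + 1)) : Int)) * (dd (m + 1) : Int) * n ^ (k + 1 - 2 * (m + 1))) := by
      intro m _
      by_cases h : 2 * (m + 1) ≤ k + 1
      · have he : k + 2 - 2 * (m + 1) = (k + 1 - 2 * (m + 1)) + 1 := by omega
        rw [he, pow_succ]; ring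
      · have h0 : (k + 1).choose (2 * (m + 1)) = 0 := Nat.choose_eq_zero_of_lt (by omega)
        simp [h0]
    rw [Finset.sum_congr rfl hcong, ← Finset.mul_sum]
    ring
  rw [h1, h2]
  ring

theorem Tm_eq_Mm (n : Int) (k : Nat) : Tm n k = Mm n k := by
  have h : ∀ k, Tm n k = Mm n k ∧ Tm n (k + 1) = Mm n (k + 1) := by
    intro k
    induction k with
    | zero =>
      constructor
      · simp [Tm, Mm, dd]
      · simp [Tm, Mm, dd, Finset.sum_range_succ]
    | succ k ih =>
      refine ⟨ih.2, ?_⟩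
      rw [Tm_rec, ih.1, ih.2]
      rfl
  exact (h k).1

theorem sum_map_range {f : Nat → Int} (c : Nat) :
    ((List.range c).map f).sum = ∑ i ∈ Finset.range c, f i := by
  induction c with
  | zero => simp
  | succ c ih =>
    rw [List.range_succ, Finset.sum_range_succ, List.map_append, List.sum_append, ih]; simp

-- A's inner loop over j, for a fixed nonnegative k, adds Tm n k - n^k to the accumulator
theorem innerA (n : Int) (kn : Nat) (t : Int) :
    (PySem.List.pyRange 0 (PySem.Int.floordiv (kn : Int) 2) 1).foldl (fun total j =>
      total + pvB (2 * (j + 1)) * n ^ ((kn : Int) - 2 * (j + 1)).toNat * pvComb (kn : Int) (2 * (j + 1))) t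
    = t + (Tm n kn - n ^ kn) := by
  have hq : PySem.Int.floordiv (kn : Int) 2 = ((kn / 2 : Nat) : Int) := by
    exact_mod_cast PySem.Int.floordiv_natCast kn 2
  rw [hq, PySem.List.pyRange_one, List.foldl_map, PySem.List.foldl_add]
  have hn : (((kn / 2 : Nat) : Int) - 0).toNat = kn / 2 := by omega
  rw [hn, sum_map_range]
  have hterm : ∀ i ∈ Finset.range (kn / 2),
      pvB (2 * ((0 : Int) + (i : Int) + 1)) * n ^ ((kn : Int) - 2 * ((0 : Int) + (i : Int) + 1)).toNat
        * pvComb (kn : Int) (2 * ((0 : Int) + (i : Int) + 1))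
      = ((kn.choose (2 * (i + 1)) : Int)) * (dd (i + 1) : Int) * n ^ (kn - 2 * (i + 1)) := by
    intro i _
    have h1 : (0 : Int) + (i : Int) + 1 = ((i + 1 : Nat) : Int) := by push_cast; ring
    have he : ((kn : Int) - 2 * ((0 : Int) + (i : Int) + 1)).toNat = kn - 2 * (i + 1) := by omega
    have hc : pvComb (kn : Int) (2 * ((0 : Int) + (i : Int) + 1)) = (kn.choose (2 * (i + 1)) : Int) := by
      have e1 : ((kn : Int)).toNat = kn := by omega
      have e2 : ((2 : Int) * ((0 : Int) + (i : Int) + 1)).toNat = 2 * (i + 1) := by omega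
      rw [pvComb, e1, e2]
    rw [he, hc, h1, pvB_eq]
    ring
  rw [Finset.sum_congr rfl hterm]
  have hsub : Finset.range (kn / 2) ⊆ Finset.range kn := by
    intro x hx; simp only [Finset.mem_range] at *; omega
  have hext : (∑ i ∈ Finset.range (kn / 2),
      ((kn.choose (2 * (i + 1)) : Int)) * (dd (i + 1) : Int) * n ^ (kn - 2 * (i + 1)))
      = ∑ i ∈ Finset.range kn,
      ((kn.choose (2 * (i + 1)) : Int)) * (dd (i + 1) : Int) * n ^ (kn - 2 * (i + 1)) := by
    apply Finset.sum_subset hsub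
    intro i _ hni
    have h0 : kn.choose (2 * (i + 1)) = 0 := by
      apply Nat.choose_eq_zero_of_lt
      simp only [Finset.mem_range] at hni
      omega
    simp [h0]
  have hT : Tm n kn = (∑ i ∈ Finset.range kn,
      ((kn.choose (2 * (i + 1)) : Int)) * (dd (i + 1) : Int) * n ^ (kn - 2 * (i + 1))) + n ^ kn := by
    rw [Tm, Finset.sum_range_succ']
    simp [dd]
  rw [hext, hT]
  ring

theorem A_eq_sum (n : Int) (c : Nat) :
    metric_tensor_basis_size (1 + (c : Int)) n
      = ∑ i ∈ Finset.range c, (Tm n (i + 2) - n ^ (i + 2)) := by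
  rw [metric_tensor_basis_size, PySem.List.pyRange_one]
  have hn : ((1 + (c : Int) + 1) - 2).toNat = c := by omega
  rw [hn, List.foldl_map]
  have hfun : (fun (total : Int) (i : Nat) =>
      (PySem.List.pyRange 0 (PySem.Int.floordiv ((2 : Int) + (i : Int)) 2) 1).foldl (fun total j =>
        total + pvB (2 * (j + 1)) * n ^ (((2 : Int) + (i : Int)) - 2 * (j + 1)).toNat
          * pvComb ((2 : Int) + (i : Int)) (2 * (j + 1))) total)
      = fun (total : Int) (i : Nat) => total + (Tm n (i + 2) - n ^ (i + 2)) := by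
    funext t i
    have h2 : (2 : Int) + (i : Int) = ((i + 2 : Nat) : Int) := by push_cast; ring
    rw [h2, innerA]
  rw [hfun, PySem.List.foldl_add, sum_map_range]
  simp

theorem B_invariant (n : Int) (c : Nat) :
    (PySem.List.pyRange 2 (2 + (c : Int)) 1).foldl
      (fun (st : Int × Int × Int) k =>
        (st.2.1, n * st.2.1 + (k - 1) * st.1, st.2.2 + ((n * st.2.1 + (k - 1) * st.1) - n ^ k.toNat)))
      ((1 : Int), n, (0 : Int))
    = (Mm n c, Mm n (c + 1), ∑ i ∈ Finset.range c, (Mm n (i + 2) - n ^ (i + 2))) := by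
  induction c with
  | zero =>
    rw [show (2 : Int) + ((0 : Nat) : Int) = 2 by norm_num, PySem.List.pyRange_one_eq_nil (by omega)]
    simp [Mm]
  | succ c ih =>
    have hs : (2 : Int) + ((c + 1 : Nat) : Int) = (2 + (c : Int)) + 1 := by push_cast; ring
    rw [hs, PySem.List.pyRange_one_succ_right (by omega), List.foldl_append, ih]
    simp only [List.foldl_cons, List.foldl_nil]
    refine Prod.ext ?_ (Prod.ext ?_ ?_)
    · rfl
    · show n * Mm n (c + 1) + ((2 + (c : Int)) - 1) * Mm n c = Mm n (c + 1 + 1)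
      have h1 : Mm n (c + 1 + 1) = n * Mm n (c + 1) + ((c : Int) + 1) * Mm n c := rfl
      rw [h1]; ring
    · show (∑ i ∈ Finset.range c, (Mm n (i + 2) - n ^ (i + 2)))
          + ((n * Mm n (c + 1) + ((2 + (c : Int)) - 1) * Mm n c) - n ^ ((2 : Int) + (c : Int)).toNat)
        = ∑ i ∈ Finset.range (c + 1), (Mm n (i + 2) - n ^ (i + 2))
      rw [Finset.sum_range_succ]
      have h1 : Mm n (c + 2) = n * Mm n (c + 1) + ((c : Int) + 1) * Mm n c := rfl
      have h2 : ((2 : Int) + (c : Int)).toNat = c + 2 := by omega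
      rw [h2, h1]; ring

theorem main_eq (total_k n : Int) :
    metric_tensor_basis_size total_k n = metric_tensor_basis_size_alt total_k n := by
  by_cases h : total_k ≤ 0
  · rw [metric_tensor_basis_size, metric_tensor_basis_size_alt,
      PySem.List.pyRange_one_eq_nil (by omega)]
    rfl
  · have hc : total_k = 1 + (((total_k - 1).toNat : Nat) : Int) := by omega
    rw [hc, A_eq_sum, metric_tensor_basis_size_alt,
      show (1 : Int) + ((total_k - 1).toNat : Int) + 1 = 2 + ((total_k - 1).toNat : Int) by ring,
      B_invariant]
    exact Finset.sum_congr rfl (fun i _ => by rw [Tm_eq_Mm])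

-- ===== VERDICT (by name: the statement is the Claim_ definition above) =====
theorem metric_tensor_basis_size_spec : Claim_equal_metric_tensor_basis_size := by
  intro total_k n _
  exact main_eq total_k n
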